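-- pv_equiv track=rewrite | github.com/jonleewh/DSA4264-Project | src/stem_test/stem_1_generate_sankey.py | build_counts
-- ===== SOURCE A (Python) =====
-- from collections import Counter
--
-- METADATA_CLEAR_STEM_REASONS = {
--     "nus_department_or_faculty_clear_stem",
--     "ntu_department_clear_stem",
--     "sutd_department_clear_stem",
-- }
--
-- def decision_path(row: dict) -> str:
--     reason = str(row.get("scope_reason") or "")
--     if reason in METADATA_CLEAR_STEM_REASONS:
--         return "metadata_stem"
--     if reason.startswith("excluded_"):
--         return "excluded_non_stem"
--     if reason == "paragraph_semantic_stem_override":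
--         return "paragraph_stem"
--     if reason == "paragraph_semantic_non_stem_guard":
--         return "paragraph_non_stem_guard"
--     if reason == "stem_semantic_sentence_override":
--         return "sentence_stem"
--     if reason == "stem_keyword_override":
--         return "keyword_stem"
--     return "keyword_remainder"
--
-- def build_counts(rows: list[dict]) -> dict[str, int]:
--     path_counts = Counter()
--
--     for row in rows:
--         path = decision_path(row)
--         path_counts[path] += 1
--
--     total = len(rows)
--     metadata_stem = path_counts["metadata_stem"]
--     excluded_non_stem = path_counts["excluded_non_stem"]
--     semantic_entry = total - metadata_stem - excluded_non_stem
--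
--     paragraph_stem = path_counts["paragraph_stem"]
--     paragraph_non_stem = path_counts["paragraph_non_stem_guard"]
--     sentence_entry = semantic_entry - paragraph_stem - paragraph_non_stem
--
--     sentence_stem = path_counts["sentence_stem"]
--     keyword_entry = sentence_entry - sentence_stem
--
--     keyword_stem = path_counts["keyword_stem"]
--     keyword_remainder = path_counts["keyword_remainder"]
--     final_stem = metadata_stem + paragraph_stem + sentence_stem + keyword_stem
--     final_non_stem = total - final_stem
--
--     return {
--         "total": total,
--         "metadata_stem": metadata_stem,
--         "excluded_non_stem": excluded_non_stem,
--         "semantic_entry": semantic_entry,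
--         "paragraph_stem": paragraph_stem,
--         "paragraph_non_stem": paragraph_non_stem,
--         "sentence_entry": sentence_entry,
--         "sentence_stem": sentence_stem,
--         "keyword_entry": keyword_entry,
--         "keyword_stem": keyword_stem,
--         "keyword_remainder": keyword_remainder,
--         "final_stem": final_stem,
--         "final_non_stem": final_non_stem,
--     }
-- ===== SOURCE B (Python) =====
-- from collections import Counter
--
-- METADATA_CLEAR_STEM_REASONS = {
--     "nus_department_or_faculty_clear_stem",
--     "ntu_department_clear_stem",
--     "sutd_department_clear_stem",
-- }
--
-- _KEYS = [
--     "total", "metadata_stem", "excluded_non_stem", "semantic_entry",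
--     "paragraph_stem", "paragraph_non_stem", "sentence_entry", "sentence_stem",
--     "keyword_entry", "keyword_stem", "keyword_remainder", "final_stem",
-- ]
--
-- def _trail(reason: str) -> list[str]:
--     # The full list of funnel nodes a row with this scope_reason passes through.
--     if reason in METADATA_CLEAR_STEM_REASONS:
--         return ["total", "metadata_stem", "final_stem"]
--     if reason.startswith("excluded_"):
--         return ["total", "excluded_non_stem"]
--     if reason == "paragraph_semantic_stem_override":
--         return ["total", "semantic_entry", "paragraph_stem", "final_stem"]
--     if reason == "paragraph_semantic_non_stem_guard":
--         return ["total", "semantic_entry", "paragraph_non_stem"]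
--     if reason == "stem_semantic_sentence_override":
--         return ["total", "semantic_entry", "sentence_entry", "sentence_stem", "final_stem"]
--     if reason == "stem_keyword_override":
--         return ["total", "semantic_entry", "sentence_entry", "keyword_entry", "keyword_stem", "final_stem"]
--     return ["total", "semantic_entry", "sentence_entry", "keyword_entry", "keyword_remainder"]
--
-- def build_counts(rows: list[dict]) -> dict[str, int]:
--     # Expand every row into its full node trail and tally node occurrences once:
--     # each output (entry totals included) is a direct count, no reconstruction.
--     c = Counter(node for row in rows
--                 for node in _trail(str(row.get("scope_reason") or "")))
--     out = {k: c[k] for k in _KEYS}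
--     out["final_non_stem"] = c["total"] - c["final_stem"]
--     return out
-- ===== Notes on version B (the rewrite author's own statement) =====
-- stated objective: alternative
-- what changed: Instead of counting leaf categories with a Counter and reconstructing the funnel entry totals by repeated subtraction, B expands each row into the full list of funnel nodes it passes through (a static trail per reason) and tallies node occurrences over the flattened trails, so every output including semantic_entry/sentence_entry/keyword_entry/final_stem is a direct occurrence count.
import Mathlib
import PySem

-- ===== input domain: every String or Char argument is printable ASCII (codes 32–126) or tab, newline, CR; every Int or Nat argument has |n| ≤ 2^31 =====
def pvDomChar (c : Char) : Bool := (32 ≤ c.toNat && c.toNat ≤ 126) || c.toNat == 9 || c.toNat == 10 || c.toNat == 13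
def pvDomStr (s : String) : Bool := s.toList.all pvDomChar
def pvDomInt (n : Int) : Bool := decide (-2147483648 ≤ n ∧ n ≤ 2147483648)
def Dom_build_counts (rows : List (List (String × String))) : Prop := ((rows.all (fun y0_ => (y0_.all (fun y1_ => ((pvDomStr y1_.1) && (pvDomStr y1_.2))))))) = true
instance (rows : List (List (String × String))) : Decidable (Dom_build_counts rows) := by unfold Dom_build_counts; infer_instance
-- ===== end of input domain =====

-- B replaces A's leaf Counter + subtraction reconstruction by expanding each row into its
-- full funnel node trail and counting node occurrences directly (objective: alternative).

-- ===== PORT A =====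
-- module constant METADATA_CLEAR_STEM_REASONS (used only for membership, so order is irrelevant)
def pvMetaReasons : List String :=
  ["nus_department_or_faculty_clear_stem", "ntu_department_clear_stem", "sutd_department_clear_stem"]

-- str(row.get("scope_reason") or ""): values are strings, 'or' maps None and "" to ""
def pvReason (row : List (String × String)) : String :=
  match (PySem.Dict.mk row).get? "scope_reason" with
  | some s => if s = "" then "" else s
  | none => ""

def decision_path (row : List (String × String)) : String :=
  let reason := pvReason row
  if reason ∈ pvMetaReasons then "metadata_stem"
  else if PySem.Str.startswith reason "excluded_" then "excluded_non_stem"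
  else if reason = "paragraph_semantic_stem_override" then "paragraph_stem"
  else if reason = "paragraph_semantic_non_stem_guard" then "paragraph_non_stem_guard"
  else if reason = "stem_semantic_sentence_override" then "sentence_stem"
  else if reason = "stem_keyword_override" then "keyword_stem"
  else "keyword_remainder"

def build_counts (rows : List (List (String × String))) : List (String × Int) :=
  let path_counts := rows.foldl (fun d row => d.modify (decision_path row) 0 (· + 1)) PySem.Dict.empty
  let total : Int := rows.length
  let metadata_stem := path_counts.getD "metadata_stem" 0
  let excluded_non_stem := path_counts.getD "excluded_non_stem" 0
  let semantic_entry := total - metadata_stem - excluded_non_stem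
  let paragraph_stem := path_counts.getD "paragraph_stem" 0
  let paragraph_non_stem := path_counts.getD "paragraph_non_stem_guard" 0
  let sentence_entry := semantic_entry - paragraph_stem - paragraph_non_stem
  let sentence_stem := path_counts.getD "sentence_stem" 0
  let keyword_entry := sentence_entry - sentence_stem
  let keyword_stem := path_counts.getD "keyword_stem" 0
  let keyword_remainder := path_counts.getD "keyword_remainder" 0
  let final_stem := metadata_stem + paragraph_stem + sentence_stem + keyword_stem
  let final_non_stem := total - final_stem
  [("total", total), ("metadata_stem", metadata_stem), ("excluded_non_stem", excluded_non_stem),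
   ("semantic_entry", semantic_entry), ("paragraph_stem", paragraph_stem),
   ("paragraph_non_stem", paragraph_non_stem), ("sentence_entry", sentence_entry),
   ("sentence_stem", sentence_stem), ("keyword_entry", keyword_entry),
   ("keyword_stem", keyword_stem), ("keyword_remainder", keyword_remainder),
   ("final_stem", final_stem), ("final_non_stem", final_non_stem)]

-- ===== PORT B =====
def pvKeys : List String :=
  ["total", "metadata_stem", "excluded_non_stem", "semantic_entry",
   "paragraph_stem", "paragraph_non_stem", "sentence_entry", "sentence_stem",
   "keyword_entry", "keyword_stem", "keyword_remainder", "final_stem"]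

-- _trail: the full list of funnel nodes a row with this scope_reason passes through
def pvTrail (reason : String) : List String :=
  if reason ∈ pvMetaReasons then
    ["total", "metadata_stem", "final_stem"]
  else if PySem.Str.startswith reason "excluded_" then
    ["total", "excluded_non_stem"]
  else if reason = "paragraph_semantic_stem_override" then
    ["total", "semantic_entry", "paragraph_stem", "final_stem"]
  else if reason = "paragraph_semantic_non_stem_guard" then
    ["total", "semantic_entry", "paragraph_non_stem"]
  else if reason = "stem_semantic_sentence_override" then
    ["total", "semantic_entry", "sentence_entry", "sentence_stem", "final_stem"]
  else if reason = "stem_keyword_override" then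
    ["total", "semantic_entry", "sentence_entry", "keyword_entry", "keyword_stem", "final_stem"]
  else
    ["total", "semantic_entry", "sentence_entry", "keyword_entry", "keyword_remainder"]

-- Counter(iterable) is ported as occurrence count over the flattened trail list
def build_counts_alt (rows : List (List (String × String))) : List (String × Int) :=
  let nodes := rows.flatMap (fun row => pvTrail (pvReason row))
  (pvKeys.map (fun k => (k, ((nodes.count k : Nat) : Int))))
    ++ [("final_non_stem", ((nodes.count "total" : Nat) : Int) - ((nodes.count "final_stem" : Nat) : Int))]

-- ===== PRECONDITION & SPEC =====
def Spec_build_counts (rows : List (List (String × String))) (out : List (String × Int)) : Prop := out = build_counts_alt rows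
instance (rows : List (List (String × String))) (out : List (String × Int)) : Decidable (Spec_build_counts rows out) := by unfold Spec_build_counts; infer_instance

-- ===== CLAIM (what is proved, stated in full; the proofs are below) =====
def Claim_equal_build_counts : Prop := ∀ (rows : List (List (String × String))), Dom_build_counts rows → Spec_build_counts rows (build_counts rows)

-- ===== LEMMAS AND PROOFS =====

-- A-side leaf count and B-side node count
def pvCnt (k : String) (rows : List (List (String × String))) : Int :=
  ((rows.map decision_path).count k : Int)

def pvNCnt (k : String) (rows : List (List (String × String))) : Int :=
  (((rows.flatMap (fun row => pvTrail (pvReason row))).count k : Nat) : Int)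

-- trail of a row is a fixed table on its decision_path leaf
def pvTrailOf (l : String) : List String :=
  if l = "metadata_stem" then ["total", "metadata_stem", "final_stem"]
  else if l = "excluded_non_stem" then ["total", "excluded_non_stem"]
  else if l = "paragraph_stem" then ["total", "semantic_entry", "paragraph_stem", "final_stem"]
  else if l = "paragraph_non_stem_guard" then ["total", "semantic_entry", "paragraph_non_stem"]
  else if l = "sentence_stem" then ["total", "semantic_entry", "sentence_entry", "sentence_stem", "final_stem"]
  else if l = "keyword_stem" then ["total", "semantic_entry", "sentence_entry", "keyword_entry", "keyword_stem", "final_stem"]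
  else ["total", "semantic_entry", "sentence_entry", "keyword_entry", "keyword_remainder"]

theorem pv_trail_eq (row : List (String × String)) :
    pvTrail (pvReason row) = pvTrailOf (decision_path row) := by
  simp only [pvTrail, decision_path]
  by_cases h1 : pvReason row ∈ pvMetaReasons
  · simp [pvTrailOf, h1]
  · by_cases h2 : PySem.Chars.startswith (pvReason row).toList ['e','x','c','l','u','d','e','d','_'] = true
    · simp [pvTrailOf, PySem.Str.startswith, h1, h2]
    · by_cases h3 : pvReason row = "paragraph_semantic_stem_override"
      · simp only [h3]; decide
      · by_cases h4 : pvReason row = "paragraph_semantic_non_stem_guard"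
        · simp only [h4]; decide
        · by_cases h5 : pvReason row = "stem_semantic_sentence_override"
          · simp only [h5]; decide
          · by_cases h6 : pvReason row = "stem_keyword_override"
            · simp only [h6]; decide
            · simp [pvTrailOf, PySem.Str.startswith, h1, h2, h3, h4, h5, h6]

theorem pv_getA (rows : List (List (String × String))) (k : String) :
    (rows.foldl (fun d row => d.modify (decision_path row) 0 (· + 1)) PySem.Dict.empty).getD k 0
      = pvCnt k rows := by
  have h := PySem.Dict.getD_foldl_modify_add_one (l := rows.map decision_path)
      (d := (PySem.Dict.empty : PySem.Dict String Int)) (v := k)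
  rw [List.foldl_map] at h
  simpa [pvCnt, PySem.Dict.getD_empty] using h

theorem pv_path_mem (row : List (String × String)) :
    decision_path row ∈ (["metadata_stem", "excluded_non_stem", "paragraph_stem",
      "paragraph_non_stem_guard", "sentence_stem", "keyword_stem", "keyword_remainder"] : List String) := by
  simp only [decision_path]
  split_ifs <;> simp

theorem pv_cnt_cons (k : String) (r : List (String × String)) (rs : List (List (String × String))) :
    pvCnt k (r :: rs) = (if decision_path r = k then 1 else 0) + pvCnt k rs := by
  simp only [pvCnt, List.map_cons, List.count_cons, beq_iff_eq]
  split_ifs <;> push_cast <;> omega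

theorem pv_ncnt_cons (k : String) (r : List (String × String)) (rs : List (List (String × String))) :
    pvNCnt k (r :: rs) = (((pvTrailOf (decision_path r)).count k : Nat) : Int) + pvNCnt k rs := by
  simp [pvNCnt, List.flatMap_cons, List.count_append, pv_trail_eq]

theorem pv_main (rows : List (List (String × String))) :
    pvNCnt "total" rows = rows.length ∧
    pvNCnt "metadata_stem" rows = pvCnt "metadata_stem" rows ∧
    pvNCnt "excluded_non_stem" rows = pvCnt "excluded_non_stem" rows ∧
    pvNCnt "semantic_entry" rows
      = pvCnt "paragraph_stem" rows + pvCnt "paragraph_non_stem_guard" rows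
        + pvCnt "sentence_stem" rows + pvCnt "keyword_stem" rows + pvCnt "keyword_remainder" rows ∧
    pvNCnt "paragraph_stem" rows = pvCnt "paragraph_stem" rows ∧
    pvNCnt "paragraph_non_stem" rows = pvCnt "paragraph_non_stem_guard" rows ∧
    pvNCnt "sentence_entry" rows
      = pvCnt "sentence_stem" rows + pvCnt "keyword_stem" rows + pvCnt "keyword_remainder" rows ∧
    pvNCnt "sentence_stem" rows = pvCnt "sentence_stem" rows ∧
    pvNCnt "keyword_entry" rows = pvCnt "keyword_stem" rows + pvCnt "keyword_remainder" rows ∧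
    pvNCnt "keyword_stem" rows = pvCnt "keyword_stem" rows ∧
    pvNCnt "keyword_remainder" rows = pvCnt "keyword_remainder" rows ∧
    pvNCnt "final_stem" rows
      = pvCnt "metadata_stem" rows + pvCnt "paragraph_stem" rows
        + pvCnt "sentence_stem" rows + pvCnt "keyword_stem" rows := by
  induction rows with
  | nil => simp [pvNCnt, pvCnt]
  | cons r rs ih =>
    obtain ⟨i1, i2, i3, i4, i5, i6, i7, i8, i9, i10, i11, i12⟩ := ih
    have h := pv_path_mem r
    simp only [List.mem_cons, List.not_mem_nil, or_false] at h
    simp only [pv_ncnt_cons, pv_cnt_cons, List.length_cons]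
    rcases h with h | h | h | h | h | h | h <;>
      rw [h] <;> simp [pvTrailOf, List.count_nil] <;> omega

theorem pv_len_eq (rows : List (List (String × String))) :
    (rows.length : Int)
      = pvCnt "metadata_stem" rows + pvCnt "excluded_non_stem" rows + pvCnt "paragraph_stem" rows
        + pvCnt "paragraph_non_stem_guard" rows + pvCnt "sentence_stem" rows
        + pvCnt "keyword_stem" rows + pvCnt "keyword_remainder" rows := by
  induction rows with
  | nil => simp [pvCnt]
  | cons r rs ih =>
    have h := pv_path_mem r
    simp only [List.mem_cons, List.not_mem_nil, or_false] at h
    simp only [List.length_cons, pv_cnt_cons]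
    rcases h with h | h | h | h | h | h | h <;> rw [h] <;> push_cast <;> simp <;> omega

theorem build_counts_eq_alt (rows : List (List (String × String))) :
    build_counts rows = build_counts_alt rows := by
  obtain ⟨m1, m2, m3, m4, m5, m6, m7, m8, m9, m10, m11, m12⟩ := pv_main rows
  have hl := pv_len_eq rows
  simp only [build_counts, build_counts_alt, pv_getA, pvKeys, List.map_cons, List.map_nil,
    List.cons_append, List.nil_append]
  have hn : ∀ k, (((rows.flatMap (fun row => pvTrail (pvReason row))).count k : Nat) : Int)
      = pvNCnt k rows := fun _ => rfl
  simp only [hn]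
  simp only [List.cons.injEq, Prod.mk.injEq, and_true, true_and]
  refine ⟨by omega, by omega, by omega, by omega, by omega, by omega, by omega,
          by omega, by omega, by omega, by omega, by omega, by omega⟩

-- ===== VERDICT (by name: the statement is the Claim_ definition above) =====
theorem build_counts_spec : Claim_equal_build_counts := by
  intro rows _
  unfold Spec_build_counts
  exact build_counts_eq_alt rows
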